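-- pv_equiv track=rewrite | github.com/EstebanDACOSTA/MapMaker | main.py | cree_carte
-- ===== SOURCE A (Python) =====
-- def cree_carte(nb,bool):
--     carte = [[None] * nb for _ in range(nb)]
--     if bool:
--         for i in range(nb):
--             for j in range(nb):
--                 if i == 0 or i == nb-1 or j == 0 or j == nb-1:
--                     carte[i][j] = 'SSSS'
--     return carte
-- ===== SOURCE B (Python) =====
-- def cree_carte(nb, bool):
--     if nb <= 0:
--         return []
--     if not bool:
--         return [[None] * nb for _ in range(nb)]
--     full = ['SSSS'] * nb
--     carte = [list(full)]
--     for _ in range(nb - 2):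
--         row = [None] * nb
--         row[0] = 'SSSS'
--         row[nb - 1] = 'SSSS'
--         carte.append(row)
--     if nb > 1:
--         carte.append(list(full))
--     return carte
-- ===== Notes on version B (the rewrite author's own statement) =====
-- stated objective: simpler
-- what changed: B assigns the border directly (full first/last rows, then only the two edge cells of each interior row) instead of A's full n*n scan with a per-cell border test.
import Mathlib
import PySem

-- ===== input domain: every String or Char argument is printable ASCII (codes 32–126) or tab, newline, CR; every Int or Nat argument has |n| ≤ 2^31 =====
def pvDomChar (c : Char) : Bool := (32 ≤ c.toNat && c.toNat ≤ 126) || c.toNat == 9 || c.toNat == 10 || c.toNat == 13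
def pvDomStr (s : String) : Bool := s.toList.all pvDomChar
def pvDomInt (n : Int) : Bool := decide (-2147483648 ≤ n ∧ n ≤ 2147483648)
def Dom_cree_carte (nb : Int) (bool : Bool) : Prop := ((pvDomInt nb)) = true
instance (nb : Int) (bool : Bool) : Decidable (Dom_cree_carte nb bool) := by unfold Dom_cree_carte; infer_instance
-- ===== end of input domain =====

-- B replaces A's full n×n scan with a per-cell border test by direct assignment of the
-- border rows/columns only (objective: simpler traversal; same return value).

-- ===== PORT A =====
def cree_carte (nb : Int) (bool : Bool) : List (List (Option String)) :=
  -- carte = [[None] * nb for _ in range(nb)]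
  let carte : List (List (Option String)) :=
    (List.range nb.toNat).map (fun _ => List.replicate nb.toNat (none : Option String))
  if bool then
    (PySem.List.pyRange 0 nb 1).foldl (fun c i =>
      (PySem.List.pyRange 0 nb 1).foldl (fun c j =>
        if i = 0 ∨ i = nb - 1 ∨ j = 0 ∨ j = nb - 1 then
          -- carte[i][j] = 'SSSS'   (i, j are in range and nonnegative here)
          c.modify i.toNat (fun row => row.set j.toNat (some "SSSS"))
        else c) c) carte
  else carte

-- ===== PORT B =====
def cree_carte_alt (nb : Int) (bool : Bool) : List (List (Option String)) :=
  if nb ≤ 0 then []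
  else if !bool then
    List.replicate nb.toNat (List.replicate nb.toNat (none : Option String))
  else
    let full : List (Option String) := List.replicate nb.toNat (some "SSSS")
    let carte : List (List (Option String)) :=
      (List.range (nb - 2).toNat).foldl (fun c _ =>
        c ++ [((List.replicate nb.toNat (none : Option String)).set 0 (some "SSSS")).set
                (nb.toNat - 1) (some "SSSS")]) [full]
    if 1 < nb then carte ++ [full] else carte

-- ===== PRECONDITION & SPEC =====
def Spec_cree_carte (nb : Int) (bool : Bool) (out : List (List (Option String))) : Prop := out = cree_carte_alt nb bool
instance (nb : Int) (bool : Bool) (out : List (List (Option String))) : Decidable (Spec_cree_carte nb bool out) := by unfold Spec_cree_carte; infer_instance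

-- ===== CLAIM (what is proved, stated in full; the proofs are below) =====
def Claim_equal_cree_carte : Prop := ∀ (nb : Int) (bool : Bool), Dom_cree_carte nb bool → Spec_cree_carte nb bool (cree_carte nb bool)

-- ===== LEMMAS AND PROOFS =====

-- A fold that only ever modifies one fixed index commutes with List.modify.
lemma foldl_modify_fixed {α β : Type} (js : List β) (k : Nat) (g : β → α → α) (c : List α) :
    js.foldl (fun c j => c.modify k (g j)) c
      = c.modify k (fun r => js.foldl (fun r j => g j r) r) := by
  induction js generalizing c with
  | nil => exact (List.modify_id k c).symm
  | cons j js ih =>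
      simp only [List.foldl_cons]
      rw [ih, List.modify_modify_eq]
      rfl

lemma foldl_range_modify_length {α : Type} (F : Nat → α → α) (n : Nat) (l : List α) :
    ((List.range n).foldl (fun c k => c.modify k (F k)) l).length = l.length := by
  induction n with
  | zero => simp
  | succ n ih =>
      rw [List.range_succ, List.foldl_append]
      simp [ih]

lemma foldl_range_modify_getElem? {α : Type} (F : Nat → α → α) (n : Nat) (l : List α)
    (j : Nat) (hj : j < l.length) :
    ((List.range n).foldl (fun c k => c.modify k (F k)) l)[j]?
      = some (if j < n then F j (l[j]) else l[j]) := by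
  induction n with
  | zero => simp [hj]
  | succ n ih =>
      rw [List.range_succ, List.foldl_append]
      simp only [List.foldl_cons, List.foldl_nil]
      rw [List.getElem?_modify, ih]
      by_cases h : n = j
      · subst h; simp
      · simp only [h, if_false]
        by_cases h2 : j < n
        · simp [h2, Nat.lt_succ_of_lt h2]
        · have : ¬ j < n + 1 := by omega
          simp [h2, this]

-- the border cell value at (i, j) of an n×n grid
def pvCell (n i j : Nat) : Option String :=
  if i = 0 ∨ i = n - 1 ∨ j = 0 ∨ j = n - 1 then some "SSSS" else none

-- the grid both programs produce when bool is true
def pvGrid (n : Nat) : List (List (Option String)) :=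
  (List.range n).map (fun i => (List.range n).map (pvCell n i))

-- A's inner row loop produces the row of pvGrid
lemma A_row (nb : Int) (hnb : 0 < nb) (i : Nat) :
    ((List.range nb.toNat).map (fun (k : Nat) => (k : Int))).foldl
      (fun r j => if (i : Int) = 0 ∨ (i : Int) = nb - 1 ∨ j = 0 ∨ j = nb - 1 then
          r.set j.toNat (some "SSSS") else r)
      (List.replicate nb.toNat (none : Option String))
    = (List.range nb.toNat).map (pvCell nb.toNat i) := by
  have hfun : (fun (r : List (Option String)) (j : Int) =>
        if (i : Int) = 0 ∨ (i : Int) = nb - 1 ∨ j = 0 ∨ j = nb - 1 then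
          r.set j.toNat (some "SSSS") else r)
      = fun r j => r.modify j.toNat (fun x =>
          if (i : Int) = 0 ∨ (i : Int) = nb - 1 ∨ j = 0 ∨ j = nb - 1 then some "SSSS" else x) := by
    funext r j
    by_cases h : (i : Int) = 0 ∨ (i : Int) = nb - 1 ∨ j = 0 ∨ j = nb - 1
    · simp only [if_pos h, List.set_eq_modify]
    · simp only [if_neg h]
      exact (List.modify_id _ _).symm
  rw [hfun]
  rw [List.foldl_map]
  simp only [Int.toNat_natCast]
  apply List.ext_getElem?
  intro j
  by_cases hj : j < nb.toNat
  · rw [foldl_range_modify_getElem?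
      (fun k x => if (i : Int) = 0 ∨ (i : Int) = nb - 1 ∨ (k : Int) = 0 ∨ (k : Int) = nb - 1
        then some "SSSS" else x) _ _ j (by simpa using hj)]
    simp only [hj, if_true, List.getElem_replicate, List.getElem?_map, List.getElem?_range]
    unfold pvCell
    simp only [Option.map_some]
    split_ifs <;> first | rfl | omega
  · rw [List.getElem?_eq_none, List.getElem?_eq_none]
    · simpa using hj
    · rw [foldl_range_modify_length]; simpa using hj

-- A produces pvGrid when bool is true and nb > 0
lemma A_char (nb : Int) (hnb : 0 < nb) : cree_carte nb true = pvGrid nb.toNat := by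
  unfold cree_carte
  simp only [if_true]
  have hstep : ∀ (i : Int) (c : List (List (Option String))),
      (PySem.List.pyRange 0 nb 1).foldl
        (fun c j => if i = 0 ∨ i = nb - 1 ∨ j = 0 ∨ j = nb - 1 then
            c.modify i.toNat (fun row => row.set j.toNat (some "SSSS")) else c) c
      = c.modify i.toNat (fun r => (PySem.List.pyRange 0 nb 1).foldl
          (fun r j => if i = 0 ∨ i = nb - 1 ∨ j = 0 ∨ j = nb - 1 then
              r.set j.toNat (some "SSSS") else r) r) := by
    intro i c
    have hfun : (fun (c : List (List (Option String))) (j : Int) =>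
          if i = 0 ∨ i = nb - 1 ∨ j = 0 ∨ j = nb - 1 then
            c.modify i.toNat (fun row => row.set j.toNat (some "SSSS")) else c)
        = fun c j => c.modify i.toNat (fun r =>
            if i = 0 ∨ i = nb - 1 ∨ j = 0 ∨ j = nb - 1 then r.set j.toNat (some "SSSS") else r) := by
      funext c j
      by_cases h : i = 0 ∨ i = nb - 1 ∨ j = 0 ∨ j = nb - 1
      · simp [h]
      · simp only [if_neg h]
        exact (List.modify_id _ _).symm
    rw [hfun]
    exact foldl_modify_fixed _ _ _ _
  simp only [hstep]
  rw [PySem.List.pyRange_one]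
  simp only [Int.sub_zero, zero_add]
  rw [List.foldl_map]
  simp only [Int.toNat_natCast]
  apply List.ext_getElem?
  intro i
  by_cases hi : i < nb.toNat
  · rw [foldl_range_modify_getElem? _ _ _ i (by simpa using hi)]
    simp only [hi, if_pos, List.getElem_map]
    rw [A_row nb hnb i]
    simp [pvGrid, hi]
  · rw [List.getElem?_eq_none, List.getElem?_eq_none]
    · simp [pvGrid]; omega
    · rw [foldl_range_modify_length]; simpa using hi

-- B produces pvGrid when bool is true and nb ≥ 2
lemma B_char (nb : Int) (hnb : 2 ≤ nb) : cree_carte_alt nb true = pvGrid nb.toNat := by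
  unfold cree_carte_alt
  rw [if_neg (by omega)]
  simp only [Bool.not_true, Bool.false_eq_true, if_false]
  rw [PySem.List.foldl_append_singleton_eq_map, List.map_const', List.length_range,
    if_pos (by omega : (1 : Int) < nb)]
  set n := nb.toNat with hn
  have hn2 : 2 ≤ n := by omega
  have hm : (nb - 2).toNat = n - 2 := by omega
  rw [hm]
  apply List.ext_getElem?
  intro k
  simp only [List.singleton_append]
  rw [List.getElem?_append]
  simp only [List.length_cons, List.length_replicate]
  have hrow0 : (List.range n).map (pvCell n 0) = List.replicate n (some "SSSS") := by
    rw [List.map_congr_left (g := fun _ => some "SSSS") (by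
      intro a _; simp [pvCell])]
    rw [List.map_const', List.length_range]
  have hrowl : (List.range n).map (pvCell n (n - 1)) = List.replicate n (some "SSSS") := by
    rw [List.map_congr_left (g := fun _ => some "SSSS") (by
      intro a _; simp [pvCell])]
    rw [List.map_const', List.length_range]
  have hrowi : ∀ i, 1 ≤ i → i < n - 1 →
      ((List.replicate n (none : Option String)).set 0 (some "SSSS")).set (n - 1) (some "SSSS")
        = (List.range n).map (pvCell n i) := by
    intro i h1 h2
    apply List.ext_getElem?
    intro j
    rw [List.getElem?_set, List.getElem?_set]
    simp only [List.length_set, List.length_replicate, List.getElem?_replicate]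
    by_cases hjn : j < n
    · have hmapj : ((List.range n).map (pvCell n i))[j]? = some (pvCell n i j) := by
        simp [hjn]
      rw [hmapj]
      have hcell : pvCell n i j = if j = 0 ∨ j = n - 1 then some "SSSS" else none := by
        unfold pvCell
        have : (i = 0 ∨ i = n - 1 ∨ j = 0 ∨ j = n - 1) ↔ (j = 0 ∨ j = n - 1) := by omega
        rw [if_congr this rfl rfl]
      rw [hcell]
      split_ifs <;> (try rfl) <;> omega
    · have hmapj : ((List.range n).map (pvCell n i))[j]? = none := by
        rw [List.getElem?_eq_none]; simpa using Nat.not_lt.mp hjn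
      rw [hmapj]
      split_ifs <;> (try rfl) <;> omega
  by_cases hk : k < n
  · have hg : (pvGrid n)[k]? = some ((List.range n).map (pvCell n k)) := by
      simp [pvGrid, hk]
    rw [hg]
    by_cases hk0 : k = 0
    · subst hk0
      rw [if_pos (by omega)]
      simp [hrow0]
    · by_cases hkl : k = n - 1
      · subst hkl
        rw [if_neg (by omega)]
        have h0 : n - 1 - (n - 2 + 1) = 0 := by omega
        rw [h0]
        simp [hrowl]
      · rw [if_pos (by omega), List.getElem?_cons, if_neg hk0,
          List.getElem?_replicate, if_pos (by omega), hrowi k (by omega) (by omega)]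
  · have hg : (pvGrid n)[k]? = none := by
      rw [List.getElem?_eq_none]; simp only [pvGrid, List.length_map, List.length_range]; omega
    rw [hg, if_neg (by omega), List.getElem?_eq_none]
    simp only [List.length_cons, List.length_nil]
    omega

-- ===== VERDICT (by name: the statement is the Claim_ definition above) =====
theorem cree_carte_spec : Claim_equal_cree_carte := by
  intro nb bool _
  unfold Spec_cree_carte
  cases bool with
  | false =>
      show cree_carte nb false = cree_carte_alt nb false
      unfold cree_carte cree_carte_alt
      simp only [Bool.false_eq_true, if_false, Bool.not_false, if_true, List.map_const',
        List.length_range]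
      by_cases h : nb ≤ 0
      · rw [if_pos h]
        have : nb.toNat = 0 := by omega
        simp [this]
      · rw [if_neg h]
  | true =>
      by_cases h0 : nb ≤ 0
      · show cree_carte nb true = cree_carte_alt nb true
        unfold cree_carte cree_carte_alt
        rw [PySem.List.pyRange_one_eq_nil (by omega), if_pos h0]
        simp only [if_true, List.foldl_nil]
        have : nb.toNat = 0 := by omega
        simp [this]
      · by_cases h1 : nb = 1
        · subst h1; decide
        · show cree_carte nb true = cree_carte_alt nb true
          rw [A_char nb (by omega), B_char nb (by omega)]
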